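-- pv_equiv track=rewrite | github.com/Merlendo/Scabble-101 | projetlyna.py | mot_jouable
-- ===== SOURCE A (Python) =====
-- def mot_jouable(mot, ll):
--
--     l = list(ll)
--     ok = True
--
--     for i in mot :
--
--         ok = ok and (i in l )
--
--         if ok :
--             l.remove(i)
--
--         elif '?' in l :
--                 l.remove('?')
--                 ok = True
--
--     return ok
-- ===== SOURCE B (Python) =====
-- def mot_jouable(mot, ll):
--     blanks = ll.count('?')
--     rack = sorted(c for c in ll if c != '?')
--     word = sorted(mot)
--     unmatched = 0
--     i = 0
--     for c in word:
--         while i < len(rack) and rack[i] < c: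
--             i += 1
--         if i < len(rack) and rack[i] == c:
--             i += 1
--         else:
--             unmatched += 1
--     return unmatched <= blanks
-- ===== Notes on version B (the rewrite author's own statement) =====
-- stated objective: faster
-- what changed: Replaces A's per-letter scan of a mutated rack (membership test + list.remove, with a blank-consuming repair branch) by sorting the word and the non-blank tiles once and counting the unmatched word letters in a single two-pointer merge, then comparing that deficit with the blank count.
import Mathlib
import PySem

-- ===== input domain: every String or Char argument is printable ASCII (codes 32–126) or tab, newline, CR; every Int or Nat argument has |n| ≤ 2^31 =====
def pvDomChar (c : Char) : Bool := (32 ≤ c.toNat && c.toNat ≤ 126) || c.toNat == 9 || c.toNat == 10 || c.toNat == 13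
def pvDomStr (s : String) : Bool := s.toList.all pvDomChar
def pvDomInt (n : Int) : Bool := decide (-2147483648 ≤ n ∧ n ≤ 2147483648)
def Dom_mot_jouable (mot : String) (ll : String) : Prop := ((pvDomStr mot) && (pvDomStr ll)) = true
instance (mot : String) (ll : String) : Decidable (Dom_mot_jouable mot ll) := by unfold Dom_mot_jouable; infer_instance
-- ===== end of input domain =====

-- B sorts the word and the non-blank rack once and counts the unmatched letters in a single
-- two-pointer merge, instead of A's per-letter membership test + list.remove with a blank-repair
-- branch; objective: faster (sort + merge instead of repeated linear scans of a mutated rack).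


-- ===== PORT A =====
-- one iteration of A's loop; state = (l, ok).  Both l.remove calls are guarded by membership,
-- so remove? is always some and getD never takes its default.
def motJouableStep (s : List Char × Bool) (i : Char) : List Char × Bool :=
  let ok := s.2 && decide (i ∈ s.1)
  if ok then ((PySem.List.remove? s.1 i).getD s.1, ok)
  else if decide ('?' ∈ s.1) then ((PySem.List.remove? s.1 '?').getD s.1, true)
  else (s.1, ok)

def mot_jouable (mot : String) (ll : String) : Bool :=
  (mot.toList.foldl motJouableStep (ll.toList, true)).2

-- ===== PORT B =====
-- the 'while i < len(rack) and rack[i] < c: i += 1' loop (the pointer is kept as the rack suffix)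
def pvSkipLt (c : Char) : List Char → List Char
  | [] => []
  | r :: rs => if r < c then pvSkipLt c rs else r :: rs

-- the 'for c in word' loop of Source B, returning the final 'unmatched'
def pvAltCount : List Char → List Char → Nat
  | [], _ => 0
  | c :: ws, rack =>
      match pvSkipLt c rack with
      | [] => pvAltCount ws [] + 1
      | r :: rs => if r = c then pvAltCount ws rs else pvAltCount ws (r :: rs) + 1

def mot_jouable_alt (mot : String) (ll : String) : Bool :=
  let blanks := ll.toList.count '?'
  let rack := PySem.List.sorted (ll.toList.filter (fun c => c ≠ '?')) (fun x => x) false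
  let word := PySem.List.sorted mot.toList (fun x => x) false
  decide (pvAltCount word rack ≤ blanks)

-- ===== PRECONDITION & SPEC =====
def Spec_mot_jouable (mot : String) (ll : String) (out : Bool) : Prop := out = mot_jouable_alt mot ll
instance (mot : String) (ll : String) (out : Bool) : Decidable (Spec_mot_jouable mot ll out) := by unfold Spec_mot_jouable; infer_instance

-- ===== CLAIM (what is proved, stated in full; the proofs are below) =====
def Claim_equal_mot_jouable : Prop := ∀ (mot : String) (ll : String), Dom_mot_jouable mot ll → Spec_mot_jouable mot ll (mot_jouable mot ll)

-- ===== LEMMAS AND PROOFS =====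

-- A's loop, state-free form: take the letter's tile if present, else a blank, else fail.
def greedyA : List Char → List Char → Bool
  | [], _ => true
  | c :: ms, l =>
    if c ∈ l then greedyA ms (l.erase c)
    else if '?' ∈ l then greedyA ms (l.erase '?')
    else false

-- multiset deficit: letters of ms that find no identical tile in r (each match consumes its tile)
def pvDeficit : List Char → List Char → Nat
  | [], _ => 0
  | c :: ms, r => if c ∈ r then pvDeficit ms (r.erase c) else pvDeficit ms r + 1

-- once ok is False there is no blank left, and A's loop never changes the state again
theorem foldA_false (ms : List Char) (l : List Char) (h : '?' ∉ l) :
    (ms.foldl motJouableStep (l, false)).2 = false := by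
  induction ms with
  | nil => rfl
  | cons c ms ih =>
    have hstep : motJouableStep (l, false) c = (l, false) := by
      simp [motJouableStep, h]
    simpa [hstep] using ih

theorem A_eq_greedy (ms : List Char) (l : List Char) :
    (ms.foldl motJouableStep (l, true)).2 = greedyA ms l := by
  induction ms generalizing l with
  | nil => rfl
  | cons c ms ih =>
    by_cases hc : c ∈ l
    · have hstep : motJouableStep (l, true) c = (l.erase c, true) := by
        simp [motJouableStep, hc, PySem.List.remove?_eq_some_erase l c hc]
      simp [greedyA, hc, hstep, ih]
    · by_cases hq : '?' ∈ l
      · have hstep : motJouableStep (l, true) c = (l.erase '?', true) := by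
          simp [motJouableStep, hc, hq, PySem.List.remove?_eq_some_erase l '?' hq]
        simp [greedyA, hc, hq, hstep, ih]
      · have hstep : motJouableStep (l, true) c = (l, false) := by
          simp [motJouableStep, hc, hq]
        simp [greedyA, hc, hq, hstep, foldA_false ms l hq]

theorem greedy_eq_deficit (ms : List Char) (l : List Char) :
    greedyA ms l =
      decide (pvDeficit ms (l.filter (fun c => c ≠ '?')) ≤ l.count '?') := by
  induction ms generalizing l with
  | nil => simp [greedyA, pvDeficit]
  | cons c ms ih =>
    have hqr : '?' ∉ l.filter (fun c => c ≠ '?') := by simp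
    have hfq : (l.erase '?').filter (fun c => c ≠ '?') = l.filter (fun c => c ≠ '?') := by
      rw [← List.erase_filter]; exact List.erase_of_not_mem hqr
    by_cases hceq : c = '?'
    · subst hceq
      by_cases hm : '?' ∈ l
      · have hcnt : 1 ≤ l.count '?' := List.count_pos_iff.mpr hm
        simp only [greedyA, if_pos hm, ih, hfq, List.count_erase_self,
          pvDeficit, if_neg hqr]
        exact decide_eq_decide.mpr (by omega)
      · have hcnt : l.count '?' = 0 := List.count_eq_zero.mpr hm
        simp [greedyA, hm, pvDeficit, hcnt]
    · by_cases hm : c ∈ l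
      · have hcr : c ∈ l.filter (fun c => c ≠ '?') := List.mem_filter.mpr ⟨hm, by simp [hceq]⟩
        have hne : ('?' : Char) ≠ c := fun e => hceq e.symm
        simp only [greedyA, if_pos hm, ih, ← List.erase_filter,
          List.count_erase_of_ne hne, pvDeficit, if_pos hcr]
      · have hcr : c ∉ l.filter (fun c => c ≠ '?') := fun h => hm (List.mem_filter.mp h).1
        by_cases hq : '?' ∈ l
        · have hcnt : 1 ≤ l.count '?' := List.count_pos_iff.mpr hq
          simp only [greedyA, if_neg hm, if_pos hq, ih, hfq, List.count_erase_self,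
            pvDeficit, if_neg hcr]
          exact decide_eq_decide.mpr (by omega)
        · have hcnt : l.count '?' = 0 := List.count_eq_zero.mpr hq
          simp [greedyA, hm, hq, pvDeficit, hcnt]

theorem pvDeficit_perm_right (ms : List Char) {r r' : List Char} (h : r.Perm r') :
    pvDeficit ms r = pvDeficit ms r' := by
  induction ms generalizing r r' with
  | nil => rfl
  | cons c ms ih =>
    by_cases hm : c ∈ r
    · simp [pvDeficit, hm, h.mem_iff.mp hm, ih (h.erase c)]
    · have hm' : c ∉ r' := fun hx => hm (h.mem_iff.mpr hx)
      simp [pvDeficit, hm, hm', ih h]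

theorem pvDeficit_perm_left {ms ms' : List Char} (h : ms.Perm ms') (r : List Char) :
    pvDeficit ms r = pvDeficit ms' r := by
  induction h generalizing r with
  | nil => rfl
  | cons x _ ih =>
    by_cases hm : x ∈ r <;> simp [pvDeficit, hm, ih]
  | swap x y l =>
    by_cases hxy : x = y
    · subst hxy; rfl
    · by_cases hx : x ∈ r <;> by_cases hy : y ∈ r
      · have hyx : y ∈ r.erase x := (List.mem_erase_of_ne (Ne.symm hxy)).mpr hy
        have hxy' : x ∈ r.erase y := (List.mem_erase_of_ne hxy).mpr hx
        simp [pvDeficit, hx, hy, hyx, hxy', List.erase_comm]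
      · have hyx : y ∉ r.erase x := fun hh => hy ((List.mem_erase_of_ne (Ne.symm hxy)).mp hh)
        simp [pvDeficit, hx, hy, hyx]
      · have hxy' : x ∉ r.erase y := fun hh => hx ((List.mem_erase_of_ne hxy).mp hh)
        simp [pvDeficit, hx, hy, hxy']
      · simp [pvDeficit, hx, hy]
  | trans _ _ ih1 ih2 => exact (ih1 r).trans (ih2 r)

-- tiles smaller than every remaining letter never get matched, so they are irrelevant
theorem pvDeficit_append_left (ms : List Char) :
    ∀ (extra r : List Char), (∀ d ∈ extra, ∀ w ∈ ms, w ≠ d) →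
      pvDeficit ms (extra ++ r) = pvDeficit ms r := by
  induction ms with
  | nil => intro extra r _; rfl
  | cons c ms ih =>
    intro extra r h
    have hce : c ∉ extra := fun hc => h c hc c List.mem_cons_self rfl
    have hmem : c ∈ extra ++ r ↔ c ∈ r := by simp [List.mem_append, hce]
    have h' : ∀ d ∈ extra, ∀ w ∈ ms, w ≠ d :=
      fun d hd w hw => h d hd w (List.mem_cons_of_mem _ hw)
    by_cases hm : c ∈ r
    · rw [pvDeficit, if_pos (hmem.mpr hm), List.erase_append_right r hce,
        ih extra (r.erase c) h', pvDeficit, if_pos hm]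
    · rw [pvDeficit, if_neg (fun hh => hm (hmem.mp hh)), ih extra r h', pvDeficit, if_neg hm]

-- the skipped rack prefix: all its tiles are < c, and it prepends to the rest
theorem pvSkipLt_split (c : Char) (l : List Char) :
    ∃ E, (∀ d ∈ E, d < c) ∧ E ++ pvSkipLt c l = l := by
  induction l with
  | nil => exact ⟨[], by simp, rfl⟩
  | cons x xs ih =>
    by_cases hx : x < c
    · obtain ⟨E, h1, h2⟩ := ih
      refine ⟨x :: E, ?_, by simpa [pvSkipLt, hx] using h2⟩
      intro d hd
      rcases List.mem_cons.mp hd with h | h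
      · exact h ▸ hx
      · exact h1 d h
    · exact ⟨[], by simp, by simp [pvSkipLt, hx]⟩

theorem pvSkipLt_head_not_lt (c : Char) :
    ∀ (l : List Char) {r : Char} {rs : List Char}, pvSkipLt c l = r :: rs → ¬ r < c := by
  intro l
  induction l with
  | nil => intro r rs h; simp [pvSkipLt] at h
  | cons x xs ih =>
    intro r rs h
    by_cases hx : x < c
    · exact ih (by simpa [pvSkipLt, hx] using h)
    · rw [pvSkipLt, if_neg hx] at h
      cases h
      exact hx

theorem pvSkipLt_pairwise (c : Char) (l : List Char) (h : l.Pairwise (· ≤ ·)) :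
    (pvSkipLt c l).Pairwise (· ≤ ·) := by
  obtain ⟨E, _, h2⟩ := pvSkipLt_split c l
  rw [← h2] at h
  exact List.Pairwise.sublist (List.sublist_append_right E _) h

theorem altCount_eq_deficit (ws : List Char) (rack : List Char)
    (hws : ws.Pairwise (· ≤ ·)) (hr : rack.Pairwise (· ≤ ·)) :
    pvAltCount ws rack = pvDeficit ws rack := by
  induction ws generalizing rack with
  | nil => rfl
  | cons c ws ih =>
    have hcw : ∀ w ∈ ws, c ≤ w := fun w hw => List.rel_of_pairwise_cons hws hw
    have hw' : ws.Pairwise (· ≤ ·) := hws.of_cons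
    obtain ⟨E, hE, hsplit⟩ := pvSkipLt_split c rack
    have hirr : ∀ d ∈ E, ∀ w ∈ c :: ws, w ≠ d := by
      intro d hd w hwm he
      rcases List.mem_cons.mp hwm with h1 | h1
      · exact absurd (hE d hd) (by simp [← he, h1])
      · exact absurd (hE d hd) (not_lt.mpr (he ▸ hcw w h1))
    have hirr' : ∀ d ∈ E, ∀ w ∈ ws, w ≠ d :=
      fun d hd w hw => hirr d hd w (List.mem_cons_of_mem _ hw)
    have hskip_sorted : (pvSkipLt c rack).Pairwise (· ≤ ·) := pvSkipLt_pairwise c rack hr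
    rcases hs : pvSkipLt c rack with _ | ⟨r, rs⟩
    · rw [hs, List.append_nil] at hsplit
      have hcm : c ∉ rack := fun hc => absurd (hE c (hsplit ▸ hc)) (lt_irrefl c)
      have h0 : pvDeficit ws rack = pvDeficit ws [] := by
        rw [← hsplit, ← List.append_nil E]
        exact pvDeficit_append_left ws E [] hirr'
      simp only [pvAltCount, hs]
      rw [ih [] hw' List.Pairwise.nil, pvDeficit, if_neg hcm, h0]
    · rw [hs] at hsplit hskip_sorted
      have hcE : c ∉ E := fun hc => absurd (hE c hc) (lt_irrefl c)
      have hrnotlt : ¬ r < c := pvSkipLt_head_not_lt c rack hs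
      by_cases hrc : r = c
      · subst hrc
        have hrs_sorted : rs.Pairwise (· ≤ ·) := hskip_sorted.of_cons
        have hcm : r ∈ rack := by rw [← hsplit]; simp
        have herase : rack.erase r = E ++ rs := by
          rw [← hsplit, List.erase_append_right _ hcE, List.erase_cons_head]
        simp only [pvAltCount, hs, if_true]
        rw [ih rs hw' hrs_sorted, pvDeficit, if_pos hcm, herase,
          pvDeficit_append_left ws E rs hirr']
      · have hclt : c < r := lt_of_le_of_ne (not_lt.mp hrnotlt) (fun e => hrc e.symm)
        have hcskip : c ∉ r :: rs := by
          intro hc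
          rcases List.mem_cons.mp hc with h1 | h1
          · exact hrc h1.symm
          · exact absurd hclt (not_lt.mpr (List.rel_of_pairwise_cons hskip_sorted h1))
        have hcm : c ∉ rack := by
          rw [← hsplit]
          intro hc
          rcases List.mem_append.mp hc with h1 | h1
          · exact hcE h1
          · exact hcskip h1
        have h0 : pvDeficit ws rack = pvDeficit ws (r :: rs) := by
          rw [← hsplit]; exact pvDeficit_append_left ws E (r :: rs) hirr'
        simp only [pvAltCount, hs, if_neg hrc]
        rw [ih (r :: rs) hw' hskip_sorted, pvDeficit, if_neg hcm, h0]

-- ===== VERDICT (by name: the statement is the Claim_ definition above) =====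
theorem mot_jouable_spec : Claim_equal_mot_jouable := by
  intro mot ll _
  unfold Spec_mot_jouable
  simp only [mot_jouable, mot_jouable_alt]
  rw [A_eq_greedy, greedy_eq_deficit]
  rw [altCount_eq_deficit _ _
      (PySem.List.sorted_pairwise mot.toList (fun x => x))
      (PySem.List.sorted_pairwise (ll.toList.filter (fun c => c ≠ '?')) (fun x => x)),
    pvDeficit_perm_left (PySem.List.sorted_perm mot.toList (fun x => x) false),
    pvDeficit_perm_right _ (PySem.List.sorted_perm (ll.toList.filter (fun c => c ≠ '?')) (fun x => x) false)]
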